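-- pv_equiv track=rewrite | github.com/HaowenGuan/SpyderProjects | ps6pr3.py | BUtify
-- ===== SOURCE A (Python) =====
-- def BUtify(s):
--     result = ''
--     for c in s:
--         if c == 'b' or c == 'u':
--             result += c.upper()
--         else:
--             result += c
--     return result
-- ===== SOURCE B (Python) =====
-- def BUtify(s):
--     s = 'B'.join(s.split('b'))
--     return 'U'.join(s.split('u'))
-- ===== Notes on version B (the rewrite author's own statement) =====
-- stated objective: alternative
-- what changed: Replaces the per-character branching loop with an accumulating result by two staged split/join passes: the string is segmented on the first target character and rejoined with its uppercase, then likewise for the second; the maintained data is a list of segments, not a growing result string.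
import Mathlib
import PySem

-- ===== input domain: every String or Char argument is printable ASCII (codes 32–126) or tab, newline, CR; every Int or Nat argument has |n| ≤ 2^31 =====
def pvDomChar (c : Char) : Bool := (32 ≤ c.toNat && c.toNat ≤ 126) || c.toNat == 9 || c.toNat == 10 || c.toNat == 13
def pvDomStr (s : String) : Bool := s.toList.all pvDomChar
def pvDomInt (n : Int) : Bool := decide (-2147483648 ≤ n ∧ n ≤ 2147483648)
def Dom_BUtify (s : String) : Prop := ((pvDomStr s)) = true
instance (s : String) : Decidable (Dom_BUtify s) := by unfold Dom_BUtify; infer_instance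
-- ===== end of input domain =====

-- B replaces A's per-character branching loop by two staged split/join passes
-- (segment on 'b', rejoin with 'B'; then segment on 'u', rejoin with 'U').


-- ===== PORT A =====
-- result = ''; for c in s: result += c.upper() if c == 'b' or c == 'u' else c
def BUtify (s : String) : String :=
  String.ofList (s.toList.foldl
    (fun result c =>
      if c == 'b' || c == 'u' then result ++ [PySem.Chars.upperChar c]
      else result ++ [c]) [])

-- ===== PORT B =====
-- s = 'B'.join(s.split('b')); return 'U'.join(s.split('u'))
def BUtify_alt (s : String) : String :=
  let s1 := PySem.Str.join "B" ((PySem.Str.split? s "b").getD [])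
  PySem.Str.join "U" ((PySem.Str.split? s1 "u").getD [])

-- ===== PRECONDITION & SPEC =====
def Spec_BUtify (s : String) (out : String) : Prop := out = BUtify_alt s
instance (s : String) (out : String) : Decidable (Spec_BUtify s out) := by unfold Spec_BUtify; infer_instance

-- ===== CLAIM (what is proved, stated in full; the proofs are below) =====
def Claim_equal_BUtify : Prop := ∀ (s : String), Dom_BUtify s → Spec_BUtify s (BUtify s)

-- ===== LEMMAS AND PROOFS =====

-- reference splitter on a single-character separator, with the pending segment
def splits (c : Char) : List Char → List Char → List (List Char)
  | [], cur => [cur.reverse]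
  | x :: rest, cur => if x = c then cur.reverse :: splits c rest [] else splits c rest (x :: cur)

theorem go_eq_splits (c : Char) (l cur : List Char) (acc : List (List Char)) (fuel : Nat) (h : l.length < fuel) :
    PySem.Chars.splitOn.go [c] fuel l cur acc = acc.reverse ++ splits c l cur := by
  induction l generalizing fuel cur acc with
  | nil =>
    cases fuel with
    | zero => omega
    | succ n => rw [PySem.Chars.splitOn.go.eq_def]; simp [splits]
  | cons x rest ih =>
    cases fuel with
    | zero => omega
    | succ n =>
      rw [PySem.Chars.splitOn.go.eq_def]
      by_cases hx : x = c
      · subst hx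
        simp [List.isPrefixOf, splits, ih _ _ _ (by simp at h; omega)]
      · have hx' : ¬ c = x := fun hh => hx hh.symm
        simp [List.isPrefixOf, hx, hx', splits, ih _ _ _ (by simp at h; omega)]

theorem splits_ne_nil (c : Char) (l cur : List Char) : splits c l cur ≠ [] := by
  induction l generalizing cur with
  | nil => simp [splits]
  | cons x rest ih => by_cases hx : x = c <;> simp [splits, hx, ih]

theorem join_splits (c d : Char) (l cur : List Char) :
    PySem.Chars.join [d] (splits c l cur)
      = cur.reverse ++ l.map (fun x => if x = c then d else x) := by
  induction l generalizing cur with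
  | nil => simp [splits, PySem.Chars.join, List.intercalate]
  | cons x rest ih =>
    by_cases hx : x = c
    · subst hx
      have h1 := ih ([] : List Char)
      obtain ⟨a, t, hat⟩ : ∃ a t, splits x rest [] = a :: t :=
        (List.exists_cons_of_ne_nil (splits_ne_nil x rest [])).imp (fun a ⟨t, h⟩ => ⟨t, h⟩)
      simp only [splits, List.map_cons]
      rw [hat] at h1 ⊢
      simp [PySem.Chars.join, List.intercalate] at h1 ⊢
      simp [h1]
    · simp [splits, hx, ih, List.map_cons]

theorem join_splitOn (c d : Char) (l : List Char) :
    PySem.Chars.join [d] (PySem.Chars.splitOn l [c])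
      = l.map (fun x => if x = c then d else x) := by
  unfold PySem.Chars.splitOn
  rw [go_eq_splits c l [] [] (l.length + 1) (by omega)]
  simpa using join_splits c d l []

theorem foldl_A (l acc : List Char) :
    l.foldl
      (fun result c =>
        if c == 'b' || c == 'u' then result ++ [PySem.Chars.upperChar c]
        else result ++ [c]) acc
      = acc ++ l.map (fun c => if c == 'b' || c == 'u' then PySem.Chars.upperChar c else c) := by
  induction l generalizing acc with
  | nil => simp
  | cons c l ih =>
    simp only [List.foldl_cons, List.map_cons, ih]
    split_ifs <;> simp

-- one split/join pass on a single-char separator acts as a character map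
theorem alt_step (s sep joiner : String) (c d : Char)
    (hsep : sep.toList = [c]) (hj : joiner.toList = [d]) :
    (PySem.Str.join joiner ((PySem.Str.split? s sep).getD [])).toList
      = s.toList.map (fun x => if x = c then d else x) := by
  have h := PySem.Str.split?_map s sep
  rw [hsep] at h
  have hs : PySem.Chars.split? s.toList [c] = some (PySem.Chars.splitOn s.toList [c]) := by
    simp [PySem.Chars.split?]
  rw [hs] at h
  cases hsplit : PySem.Str.split? s sep with
  | none => rw [hsplit] at h; simp at h
  | some parts =>
    rw [hsplit] at h
    simp only [Option.map_some, Option.some.injEq] at h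
    simp [PySem.Str.toList_join, hj, h, join_splitOn]

-- ===== VERDICT (by name: the statement is the Claim_ definition above) =====
theorem BUtify_spec : Claim_equal_BUtify := by
  intro s _
  unfold Spec_BUtify BUtify BUtify_alt
  apply String.toList_injective
  dsimp only
  have h1 := alt_step s "b" "B" 'b' 'B' rfl rfl
  have h2 := alt_step (PySem.Str.join "B" ((PySem.Str.split? s "b").getD [])) "u" "U" 'u' 'U' rfl rfl
  simp only [h2, h1, List.map_map]
  simp only [String.toList_ofList]
  rw [foldl_A]
  simp only [List.nil_append]
  apply List.map_congr_left
  intro x _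
  by_cases hb : x = 'b'
  · subst hb; decide
  · by_cases hu : x = 'u' <;> simp [hb, hu, Function.comp]; decide
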